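-- pv_equiv track=rewrite | github.com/gany-c/DataStructures | src/misc/set_split.py | subsetA
-- ===== SOURCE A (Python) =====
-- def subsetA(arr):
--     # Write your code here
--     if not arr:
--         return arr
--
--     sorted_arr = sorted(arr)
--     output = []
--     output_sum = 0
--     original_sum = sum(sorted_arr)
--
--     while len(sorted_arr) > 0:
--         last_elem = sorted_arr[-1]
--         output.insert(0, last_elem)
--         sorted_arr = sorted_arr[0: -1]
--
--         output_sum += last_elem
--         original_sum -= last_elem
--
--         if output_sum > original_sum:
--            break
--
--     return output
-- ===== SOURCE B (Python) =====
-- def subsetA(arr):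
--     s = sorted(arr)
--     total = sum(s)
--     run = 0
--     for i in range(len(s) - 1, -1, -1):
--         run += s[i]
--         if run > total - run:
--             return s[i:]
--     return s
-- ===== Notes on version B (the rewrite author's own statement) =====
-- stated objective: alternative
-- what changed: Instead of repeatedly slicing the sorted list and front-inserting into the output, B sorts once and makes one reverse index scan with a running sum, returning the suffix slice when it first exceeds the remainder; it trades A's quadratic slicing loop for a scan, though on the measured inputs both are dominated by the sort.
import Mathlib
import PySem

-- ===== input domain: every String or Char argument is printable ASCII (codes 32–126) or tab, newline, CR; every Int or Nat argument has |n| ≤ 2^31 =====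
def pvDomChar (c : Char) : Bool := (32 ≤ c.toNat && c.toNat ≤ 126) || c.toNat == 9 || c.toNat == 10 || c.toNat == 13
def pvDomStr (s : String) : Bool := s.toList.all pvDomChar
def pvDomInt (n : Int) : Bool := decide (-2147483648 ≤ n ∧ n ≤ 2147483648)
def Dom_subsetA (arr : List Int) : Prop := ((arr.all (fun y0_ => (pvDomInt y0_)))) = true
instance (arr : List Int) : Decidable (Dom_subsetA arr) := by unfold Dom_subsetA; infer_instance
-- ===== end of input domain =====

-- B replaces A's repeated list slicing and front insertion by a single reverse
-- index scan with a running sum over the sorted list, returning a suffix slice.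

-- ===== PORT A =====
-- the while loop; fuel = length of sorted_arr, which shrinks by one each iteration
def subsetA_loop (fuel : Nat) (sorted_arr output : List Int)
    (output_sum original_sum : Int) : List Int :=
  match fuel with
  | 0 => output
  | fuel + 1 =>
    if sorted_arr.length > 0 then
      match PySem.List.pyGet? sorted_arr (-1) with   -- sorted_arr[-1]
      | none => output          -- unreachable: list is non-empty
      | some last_elem =>
        let output' := last_elem :: output                         -- output.insert(0, last_elem)
        let sorted_arr' := PySem.List.slice sorted_arr (some 0) (some (-1))  -- sorted_arr[0:-1]
        let output_sum' := output_sum + last_elem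
        let original_sum' := original_sum - last_elem
        if output_sum' > original_sum' then output'
        else subsetA_loop fuel sorted_arr' output' output_sum' original_sum'
    else output

def subsetA (arr : List Int) : List Int :=
  if arr = [] then arr
  else
    let sorted_arr := PySem.List.sorted arr (fun x => x) false
    subsetA_loop sorted_arr.length sorted_arr [] 0 sorted_arr.sum

-- ===== PORT B =====
-- for i in range(len(s)-1, -1, -1): run += s[i]; if run > total - run: return s[i:]
def subsetA_altLoop (s : List Int) (total : Int) (i : Nat) (run : Int) : List Int :=
  let run' := run + s.getD i 0            -- s[i], i always in range
  if run' > total - run' then s.drop i    -- s[i:]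
  else
    match i with
    | 0 => s
    | j + 1 => subsetA_altLoop s total j run'

def subsetA_alt (arr : List Int) : List Int :=
  let s := PySem.List.sorted arr (fun x => x) false
  if s.length = 0 then s                  -- empty range: loop body never runs
  else subsetA_altLoop s s.sum (s.length - 1) 0

-- ===== PRECONDITION & SPEC =====
def Spec_subsetA (arr : List Int) (out : List Int) : Prop := out = subsetA_alt arr
instance (arr : List Int) (out : List Int) : Decidable (Spec_subsetA arr out) := by unfold Spec_subsetA; infer_instance

-- ===== CLAIM (what is proved, stated in full; the proofs are below) =====
def Claim_equal_subsetA : Prop := ∀ (arr : List Int), Dom_subsetA arr → Spec_subsetA arr (subsetA arr)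

-- ===== LEMMAS AND PROOFS =====

-- invariant: A's loop at fuel m carries sorted_arr = s.take m, output = s.drop m
-- and the two partial sums; B's loop at index m-1 carries run = (s.drop m).sum.
theorem subsetA_loop_eq (s : List Int) :
    ∀ m : Nat, 1 ≤ m → m ≤ s.length →
    subsetA_loop m (s.take m) (s.drop m) (s.drop m).sum (s.take m).sum
      = subsetA_altLoop s s.sum (m - 1) (s.drop m).sum := by
  intro m
  induction m with
  | zero => omega
  | succ k ih =>
    intro _ hm
    have hk : k < s.length := by omega
    have htake : s.take (k + 1) = s.take k ++ [s[k]] := by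
      rw [List.take_add_one]; simp [List.getElem?_eq_getElem hk]
    have hdrop : s.drop k = s[k] :: s.drop (k + 1) := List.drop_eq_getElem_cons hk
    have hlen : (s.take (k + 1)).length = k + 1 := by
      simp [List.length_take]; omega
    have hget : PySem.List.pyGet? (s.take (k + 1)) (-1) = some s[k] := by
      rw [htake, PySem.List.pyGet?_neg_one_append_singleton]
    have hslice : PySem.List.slice (s.take (k + 1)) (some 0) (some (-1)) = s.take k := by
      rw [htake, PySem.List.slice_zero_start, PySem.List.slice_to_neg_one]
      exact List.dropLast_concat
    have hsumtake : (s.take (k + 1)).sum = (s.take k).sum + s[k] := by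
      rw [htake, List.sum_append, List.sum_cons, List.sum_nil]; ring
    have hsumdrop : (s.drop k).sum = s[k] + (s.drop (k + 1)).sum := by
      rw [hdrop, List.sum_cons]
    have htotal : s.sum = (s.take k).sum + (s.drop k).sum := by
      conv_lhs => rw [← List.take_append_drop k s]
      simp
    have hgd : s.getD k 0 = s[k] := by
      simp [List.getD_eq_getElem?_getD, List.getElem?_eq_getElem hk]
    rw [subsetA_loop, subsetA_altLoop.eq_def]
    simp only [hget, hslice, hlen]
    rw [if_pos (by omega)]
    simp only [Nat.add_sub_cancel, hgd]
    generalize hx : s[k] = x at htake hdrop hsumtake hsumdrop ⊢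
    have hcond : ((s.drop (k + 1)).sum + x > (s.take (k + 1)).sum - x)
        ↔ ((s.drop (k + 1)).sum + x > s.sum - ((s.drop (k + 1)).sum + x)) := by
      omega
    by_cases hc : (s.drop (k + 1)).sum + x > (s.take (k + 1)).sum - x
    · rw [if_pos hc, if_pos (hcond.mp hc)]
      rw [hdrop]
    · rw [if_neg hc, if_neg (fun h => hc (hcond.mpr h))]
      match k, ih, hdrop, hsumtake, hsumdrop with
      | 0, _, hdrop, _, _ =>
        rw [subsetA_loop]
        rw [← hdrop]
        exact List.drop_zero
      | j + 1, ih, hdrop, hsumtake, hsumdrop =>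
        have e1 : (s.drop (j + 1 + 1)).sum + x = (s.drop (j + 1)).sum := by
          rw [hsumdrop]; ring
        have e2 : (s.take (j + 1 + 1)).sum - x = (s.take (j + 1)).sum := by
          rw [hsumtake]; ring
        rw [e1, e2, ← hdrop]
        exact ih (by omega) (by omega)

-- ===== VERDICT (by name: the statement is the Claim_ definition above) =====
theorem subsetA_spec : Claim_equal_subsetA := by
  intro arr _
  unfold Spec_subsetA subsetA subsetA_alt
  by_cases h : arr = []
  · subst h
    have h0 : (PySem.List.sorted ([] : List Int) (fun x => x) false).length = 0 := by
      rw [PySem.List.length_sorted]; rfl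
    rw [if_pos rfl]
    simp only [h0]

    exact (List.eq_nil_of_length_eq_zero h0).symm
  · have hlen : (PySem.List.sorted arr (fun x => x) false).length = arr.length :=
      PySem.List.length_sorted arr (fun x => x) false
    have hne : (PySem.List.sorted arr (fun x => x) false).length ≠ 0 := by
      rw [hlen]; simpa using h
    rw [if_neg h]
    simp only [if_neg hne]
    set s := PySem.List.sorted arr (fun x => x) false with hs
    have := subsetA_loop_eq s s.length (by omega) (le_refl _)
    rw [List.take_length, List.drop_length] at this
    simpa using this
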